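-- pv_equiv track=rewrite | github.com/mjvotaw/sm-metadata-editor-thing | src/genre_search/genre_pick.py | get_regional_pop
-- ===== SOURCE A (Python) =====
-- def get_regional_pop(canonicalized_genre: list[str]):
--   """
--   If canonicalized_genre contains a pop genre that represents
--   a specific region, return it.
--   """
--   # list of pop sub-genres pulled from genres-tree.yaml
--   regional_pop_genres = [
-- 'Arab Pop',
-- 'Austropop',
-- 'Balkan Pop',
-- 'French Pop',
-- 'Latin Pop',
-- 'Nederpop',
-- 'Russian Pop',
-- 'Iranian Pop',
-- 'Mexican Pop',
-- 'Turkish Pop',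
-- 'Europop',
-- 'Vispop',
-- 'J-Pop',
-- 'K-Pop',
-- 'C-Pop',]
--
--   for reg in regional_pop_genres:
--     if reg in canonicalized_genre:
--
--       return reg
--
--   return None
-- ===== SOURCE B (Python) =====
-- # B: one pass over the input with a priority dict, keeping the smallest priority
-- # index seen, instead of A's scan of the fixed list with repeated membership tests.
--
-- _REGIONAL_POP_GENRES = [
--     'Arab Pop', 'Austropop', 'Balkan Pop', 'French Pop', 'Latin Pop',
--     'Nederpop', 'Russian Pop', 'Iranian Pop', 'Mexican Pop', 'Turkish Pop',
--     'Europop', 'Vispop', 'J-Pop', 'K-Pop', 'C-Pop',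
-- ]
-- _PRIORITY = {g: i for i, g in enumerate(_REGIONAL_POP_GENRES)}
--
--
-- def get_regional_pop(canonicalized_genre: list[str]):
--   """
--   If canonicalized_genre contains a pop genre that represents
--   a specific region, return it.
--   """
--   best = None
--   for g in canonicalized_genre:
--     i = _PRIORITY.get(g)
--     if i is not None and (best is None or i < best):
--       best = i
--   return None if best is None else _REGIONAL_POP_GENRES[best]
-- ===== Notes on version B (the rewrite author's own statement) =====
-- stated objective: faster
-- what changed: B replaces A's scan of the fixed regional list with repeated O(n) membership tests over the input by a single pass over the input that looks each genre up in a precomputed priority dict and keeps the smallest priority index, returning the genre at that index (the 15-string genre list itself is shared data).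
import Mathlib
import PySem

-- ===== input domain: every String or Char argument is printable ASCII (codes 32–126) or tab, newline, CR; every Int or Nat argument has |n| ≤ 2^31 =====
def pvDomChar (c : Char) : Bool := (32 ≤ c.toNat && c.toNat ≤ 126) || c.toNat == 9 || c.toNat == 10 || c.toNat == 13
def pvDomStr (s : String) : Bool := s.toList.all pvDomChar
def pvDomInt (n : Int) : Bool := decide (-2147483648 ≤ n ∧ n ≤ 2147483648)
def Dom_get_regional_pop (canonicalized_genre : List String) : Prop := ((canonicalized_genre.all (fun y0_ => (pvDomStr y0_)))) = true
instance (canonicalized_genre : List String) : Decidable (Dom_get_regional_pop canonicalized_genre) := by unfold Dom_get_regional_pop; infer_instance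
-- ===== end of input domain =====

-- B makes one pass over the input with a priority dict (keeping the smallest
-- priority index) instead of A's scan of the fixed list with membership tests.

-- ===== PORT A =====
-- 'for reg in regional_pop_genres: if reg in canonicalized_genre: return reg' / 'return None'
def pvFirstIn : List String → List String → Option String
  | [], _ => none
  | reg :: rest, xs => if reg ∈ xs then some reg else pvFirstIn rest xs

def get_regional_pop (canonicalized_genre : List String) : Option String :=
  let regional_pop_genres : List String :=
    ["Arab Pop", "Austropop", "Balkan Pop", "French Pop", "Latin Pop",
     "Nederpop", "Russian Pop", "Iranian Pop", "Mexican Pop", "Turkish Pop",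
     "Europop", "Vispop", "J-Pop", "K-Pop", "C-Pop"]
  pvFirstIn regional_pop_genres canonicalized_genre

-- ===== PORT B =====
def pvRegionalPopGenres : List String :=
  ["Arab Pop", "Austropop", "Balkan Pop", "French Pop", "Latin Pop",
   "Nederpop", "Russian Pop", "Iranian Pop", "Mexican Pop", "Turkish Pop",
   "Europop", "Vispop", "J-Pop", "K-Pop", "C-Pop"]

-- _PRIORITY = {g: i for i, g in enumerate(_REGIONAL_POP_GENRES)}
def pvPriority : PySem.Dict String Int :=
  (PySem.List.enumerate pvRegionalPopGenres).foldl (fun d p => d.insert p.2 p.1) PySem.Dict.empty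

-- one iteration of B's loop body: i = _PRIORITY.get(g); keep the smaller index
def pvStep (best : Option Int) (g : String) : Option Int :=
  match pvPriority.get? g with
  | none => best
  | some i =>
    match best with
    | none => some i
    | some b => if i < b then some i else best

def get_regional_pop_alt (canonicalized_genre : List String) : Option String :=
  match canonicalized_genre.foldl pvStep none with
  | none => none
  | some i => PySem.List.pyGet? pvRegionalPopGenres i

-- ===== PRECONDITION & SPEC =====
def Spec_get_regional_pop (canonicalized_genre : List String) (out : Option String) : Prop := out = get_regional_pop_alt canonicalized_genre
instance (canonicalized_genre : List String) (out : Option String) : Decidable (Spec_get_regional_pop canonicalized_genre out) := by unfold Spec_get_regional_pop; infer_instance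

-- ===== CLAIM (what is proved, stated in full; the proofs are below) =====
def Claim_equal_get_regional_pop : Prop := ∀ (canonicalized_genre : List String), Dom_get_regional_pop canonicalized_genre → Spec_get_regional_pop canonicalized_genre (get_regional_pop canonicalized_genre)

-- ===== LEMMAS AND PROOFS =====

-- option-valued minimum (none = no candidate yet)
def pvOmin : Option Int → Option Int → Option Int
  | none, b => b
  | a, none => a
  | some a, some b => some (min a b)

-- the minimum priority among the genres of xs that are regional pop genres
def pvM (xs : List String) : Option Int :=
  xs.foldr (fun g r => pvOmin (pvPriority.get? g) r) none

lemma pvM_cons (g : String) (xs : List String) :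
    pvM (g :: xs) = pvOmin (pvPriority.get? g) (pvM xs) := rfl

lemma pvOmin_none_right (a : Option Int) : pvOmin a none = a := by cases a <;> rfl

lemma pvStep_eq (acc : Option Int) (g : String) : pvStep acc g = pvOmin acc (pvPriority.get? g) := by
  unfold pvStep pvOmin
  cases pvPriority.get? g with
  | none => cases acc <;> rfl
  | some i =>
    cases acc with
    | none => rfl
    | some b =>
      show (if i < b then some i else some b) = some (min b i)
      split_ifs with h <;> congr 1 <;> omega

lemma pvOmin_assoc (a b c : Option Int) : pvOmin (pvOmin a b) c = pvOmin a (pvOmin b c) := by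
  cases a <;> cases b <;> cases c <;> simp [pvOmin, min_assoc]

lemma pvFoldl_step (xs : List String) (acc : Option Int) :
    xs.foldl pvStep acc = pvOmin acc (pvM xs) := by
  induction xs generalizing acc with
  | nil => simp [pvM, pvOmin_none_right]
  | cons g xs ih => simp only [List.foldl_cons, ih, pvStep_eq, pvM_cons, pvOmin_assoc]

lemma pvM_none {xs : List String} (h : pvM xs = none) : ∀ g ∈ xs, pvPriority.get? g = none := by
  induction xs with
  | nil => simp
  | cons g xs ih =>
    rw [pvM_cons] at h
    cases hg : pvPriority.get? g with
    | some i =>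
      rw [hg] at h
      exfalso
      cases hm : pvM xs <;> rw [hm] at h <;> simp [pvOmin] at h
    | none =>
      rw [hg] at h
      intro x hx
      rcases List.mem_cons.mp hx with rfl | hx'
      · exact hg
      · exact ih h x hx'

lemma pvM_achieved {xs : List String} : ∀ {k : Int}, pvM xs = some k →
    ∃ g ∈ xs, pvPriority.get? g = some k := by
  induction xs with
  | nil => intro k h; simp [pvM] at h
  | cons g xs ih =>
    intro k h
    rw [pvM_cons] at h
    cases hg : pvPriority.get? g with
    | none =>
      rw [hg] at h
      obtain ⟨x, hx, hp⟩ := ih h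
      exact ⟨x, List.mem_cons_of_mem _ hx, hp⟩
    | some i =>
      rw [hg] at h
      cases hm : pvM xs with
      | none =>
        rw [hm] at h
        simp [pvOmin] at h
        exact ⟨g, List.mem_cons_self, by rw [hg, h]⟩
      | some v =>
        rw [hm] at h
        simp only [pvOmin, Option.some.injEq] at h
        rcases le_total i v with hle | hle
        · exact ⟨g, List.mem_cons_self, by rw [hg]; congr 1; omega⟩
        · obtain ⟨x, hx, hp⟩ := ih hm
          refine ⟨x, List.mem_cons_of_mem _ hx, ?_⟩
          rw [hp]; congr 1; omega

lemma pvM_min {xs : List String} : ∀ {k : Int}, pvM xs = some k →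
    ∀ g ∈ xs, ∀ j, pvPriority.get? g = some j → k ≤ j := by
  induction xs with
  | nil => simp
  | cons g xs ih =>
    intro k h x hx j hj
    rw [pvM_cons] at h
    cases hg : pvPriority.get? g with
    | none =>
      rw [hg] at h
      rcases List.mem_cons.mp hx with rfl | hx'
      · rw [hg] at hj; simp at hj
      · exact ih h x hx' j hj
    | some i =>
      rw [hg] at h
      cases hm : pvM xs with
      | none =>
        rw [hm] at h
        simp only [pvOmin, Option.some.injEq] at h
        rcases List.mem_cons.mp hx with rfl | hx'
        · rw [hg] at hj; injection hj with hj'; omega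
        · have := pvM_none hm x hx'
          rw [this] at hj; simp at hj
      | some v =>
        rw [hm] at h
        simp only [pvOmin, Option.some.injEq] at h
        rcases List.mem_cons.mp hx with rfl | hx'
        · rw [hg] at hj; injection hj with hj'; omega
        · have := ih hm x hx' j hj
          omega

lemma pvPriority_eq : pvPriority = PySem.Dict.mk
    [("Arab Pop", 0), ("Austropop", 1), ("Balkan Pop", 2), ("French Pop", 3), ("Latin Pop", 4),
     ("Nederpop", 5), ("Russian Pop", 6), ("Iranian Pop", 7), ("Mexican Pop", 8), ("Turkish Pop", 9),
     ("Europop", 10), ("Vispop", 11), ("J-Pop", 12), ("K-Pop", 13), ("C-Pop", 14)] := by decide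

lemma pvPget_at : ∀ j : Nat, (hj : j < pvRegionalPopGenres.length) →
    pvPriority.get? pvRegionalPopGenres[j] = some (j : Int) := by decide

lemma pvPget_inv (g : String) (i : Int) (h : pvPriority.get? g = some i) :
    ∃ n : Nat, i = (n : Int) ∧ pvRegionalPopGenres[n]? = some g := by
  have hm := PySem.Dict.mem_items_of_get?_eq_some _ h
  rw [pvPriority_eq] at hm
  simp only [List.mem_cons, List.not_mem_nil, or_false, Prod.mk.injEq] at hm
  rcases hm with ⟨rfl,rfl⟩|⟨rfl,rfl⟩|⟨rfl,rfl⟩|⟨rfl,rfl⟩|⟨rfl,rfl⟩|⟨rfl,rfl⟩|⟨rfl,rfl⟩|⟨rfl,rfl⟩|⟨rfl,rfl⟩|⟨rfl,rfl⟩|⟨rfl,rfl⟩|⟨rfl,rfl⟩|⟨rfl,rfl⟩|⟨rfl,rfl⟩|⟨rfl,rfl⟩ <;>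
    first
    | exact ⟨0, by decide⟩ | exact ⟨1, by decide⟩ | exact ⟨2, by decide⟩ | exact ⟨3, by decide⟩
    | exact ⟨4, by decide⟩ | exact ⟨5, by decide⟩ | exact ⟨6, by decide⟩ | exact ⟨7, by decide⟩
    | exact ⟨8, by decide⟩ | exact ⟨9, by decide⟩ | exact ⟨10, by decide⟩ | exact ⟨11, by decide⟩
    | exact ⟨12, by decide⟩ | exact ⟨13, by decide⟩ | exact ⟨14, by decide⟩

lemma pvFirstIn_none (R xs : List String) (h : ∀ r ∈ R, r ∉ xs) : pvFirstIn R xs = none := by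
  induction R with
  | nil => rfl
  | cons a R ih =>
    simp only [pvFirstIn, if_neg (h a List.mem_cons_self)]
    exact ih fun r hr => h r (List.mem_cons_of_mem _ hr)

lemma pvFirstIn_of (R xs : List String) (k : Nat) (hk : k < R.length) (hmem : R[k] ∈ xs)
    (hnot : ∀ j (hj : j < R.length), j < k → R[j] ∉ xs) : pvFirstIn R xs = some R[k] := by
  induction R generalizing k with
  | nil => simp at hk
  | cons a R ih =>
    cases k with
    | zero =>
      have ha : a ∈ xs := by simpa using hmem
      simp [pvFirstIn, ha]
    | succ k =>
      have ha : a ∉ xs := hnot 0 (by simp) (Nat.succ_pos k)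
      simp only [pvFirstIn, if_neg ha]
      have hk' : k < R.length := by simpa using hk
      have := ih k hk' (by simpa using hmem)
        (fun j hj hjk => by simpa using hnot (j+1) (by simpa using hj) (by omega))
      simpa using this

-- ===== VERDICT (by name: the statement is the Claim_ definition above) =====
theorem get_regional_pop_spec : Claim_equal_get_regional_pop := by
  intro xs _
  show get_regional_pop xs = get_regional_pop_alt xs
  unfold get_regional_pop get_regional_pop_alt
  rw [pvFoldl_step]
  cases hM : pvM xs with
  | none =>
    show pvFirstIn pvRegionalPopGenres xs = _
    simp only [pvOmin]
    exact pvFirstIn_none _ _ fun r hr hrx => by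
      obtain ⟨n, hn, rfl⟩ := List.mem_iff_getElem.mp hr
      have hsome := pvPget_at n hn
      rw [pvM_none hM _ hrx] at hsome
      simp at hsome
  | some k =>
    show pvFirstIn pvRegionalPopGenres xs = _
    simp only [pvOmin]
    obtain ⟨g, hgx, hgp⟩ := pvM_achieved hM
    obtain ⟨n, rfl, hget⟩ := pvPget_inv g _ hgp
    obtain ⟨hn, hRn⟩ := List.getElem?_eq_some_iff.mp hget
    rw [PySem.List.pyGet?_natCast, hget]
    rw [pvFirstIn_of _ xs n hn (hRn ▸ hgx)
      (fun j hj hjn hjx => by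
        have := pvM_min hM _ hjx _ (pvPget_at j hj)
        omega), hRn]
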